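-- pv_equiv track=rewrite | github.com/usuny0317/programmers-test | day13/day13-3.py | solution
-- ===== SOURCE A (Python) =====
-- def solution(str_list):
--     answer = []
--     for i in range(0, len(str_list),1):
--         if str_list[i]=="l":
--             answer=str_list[:i]
--             break
--         elif str_list[i]=="r":
--             answer=str_list[i+1:]
--             break
--     return answer
-- ===== SOURCE B (Python) =====
-- def solution(str_list):
--     # locate-then-decide: find both marker positions first, then slice once
--     try:
--         li = str_list.index("l")
--     except ValueError:
--         li = None
--     try:
--         ri = str_list.index("r")
--     except ValueError:
--         ri = None
--     if li is None and ri is None: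
--         return []
--     if ri is None or (li is not None and li < ri):
--         return str_list[:li]
--     return str_list[ri + 1:]
-- ===== Notes on version B (the rewrite author's own statement) =====
-- stated objective: simpler
-- what changed: Replaces the index-driven scan-and-break loop with a locate-then-decide decomposition: both marker positions are found up front via list.index, then the earlier marker picks a single slice.
import Mathlib
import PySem

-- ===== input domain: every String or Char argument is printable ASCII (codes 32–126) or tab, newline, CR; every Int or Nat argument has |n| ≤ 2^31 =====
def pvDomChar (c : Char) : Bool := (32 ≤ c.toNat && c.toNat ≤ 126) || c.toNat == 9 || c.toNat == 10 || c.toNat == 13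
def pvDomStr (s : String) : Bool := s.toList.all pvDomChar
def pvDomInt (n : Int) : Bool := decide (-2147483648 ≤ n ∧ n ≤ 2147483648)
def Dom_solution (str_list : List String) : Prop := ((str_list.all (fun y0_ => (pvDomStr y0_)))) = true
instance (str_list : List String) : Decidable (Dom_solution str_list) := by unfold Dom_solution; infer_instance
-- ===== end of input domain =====

-- B replaces A's scan-and-break index loop by locating both markers first (list.index) and slicing once (objective: simpler).

-- ===== PORT A =====
-- A's 'for i in range(0, len(str_list), 1)' with break, transliterated as index recursion
def solutionGo (str_list : List String) (i : Nat) : List String :=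
  if h : i < str_list.length then
    if str_list[i] = "l" then str_list.take i
    else if str_list[i] = "r" then str_list.drop (i + 1)
    else solutionGo str_list (i + 1)
  else []
termination_by str_list.length - i

def solution (str_list : List String) : List String :=
  solutionGo str_list 0

-- ===== PORT B =====
def solution_alt (str_list : List String) : List String :=
  match PySem.List.index? str_list "l", PySem.List.index? str_list "r" with
  | none, none => []
  | some li, none => str_list.take li
  | none, some ri => str_list.drop (ri + 1)
  | some li, some ri => if li < ri then str_list.take li else str_list.drop (ri + 1)

-- ===== PRECONDITION & SPEC =====
def Spec_solution (str_list : List String) (out : List String) : Prop := out = solution_alt str_list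
instance (str_list : List String) (out : List String) : Decidable (Spec_solution str_list out) := by unfold Spec_solution; infer_instance

-- ===== CLAIM (what is proved, stated in full; the proofs are below) =====
def Claim_equal_solution : Prop := ∀ (str_list : List String), Dom_solution str_list → Spec_solution str_list (solution str_list)

-- ===== LEMMAS AND PROOFS =====

-- B's decision, as a function of the two marker indices in the suffix l.drop i
def altOn (l : List String) (i : Nat) : List String :=
  match PySem.List.index? (l.drop i) "l", PySem.List.index? (l.drop i) "r" with
  | none, none => []
  | some li, none => l.take (i + li)
  | none, some ri => l.drop (i + ri + 1)
  | some li, some ri => if li < ri then l.take (i + li) else l.drop (i + ri + 1)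

theorem go_eq_altOn (l : List String) (i : Nat) : solutionGo l i = altOn l i := by
  by_cases h : i < l.length
  · have hdrop : l.drop i = l[i] :: l.drop (i + 1) := List.drop_eq_getElem_cons h
    rw [solutionGo, dif_pos h]
    by_cases hl : l[i] = "l"
    · rw [if_pos hl]
      unfold altOn
      rw [hdrop, hl, PySem.List.index?_cons_self]
      rw [PySem.List.index?_cons_of_ne _ (by decide : ("l" : String) ≠ "r")]
      cases PySem.List.index? (l.drop (i + 1)) "r" with
      | none => simp
      | some k => simp
    · by_cases hr : l[i] = "r"
      · rw [if_neg hl, if_pos hr]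
        unfold altOn
        rw [hdrop, hr, PySem.List.index?_cons_self]
        rw [PySem.List.index?_cons_of_ne _ (by decide : ("r" : String) ≠ "l")]
        cases PySem.List.index? (l.drop (i + 1)) "l" with
        | none => simp
        | some k => simp
      · rw [if_neg hl, if_neg hr]
        rw [go_eq_altOn l (i + 1)]
        unfold altOn
        rw [hdrop, PySem.List.index?_cons_of_ne _ hl, PySem.List.index?_cons_of_ne _ hr]
        cases PySem.List.index? (l.drop (i + 1)) "l" with
        | none =>
          cases PySem.List.index? (l.drop (i + 1)) "r" with
          | none => simp
          | some k =>
            simp only [Option.map_none, Option.map_some]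
            have h2 : i + 1 + k + 1 = i + (k + 1) + 1 := by omega
            rw [h2]
        | some li =>
          cases PySem.List.index? (l.drop (i + 1)) "r" with
          | none =>
            simp only [Option.map_none, Option.map_some]
            have h1 : i + 1 + li = i + (li + 1) := by omega
            rw [h1]
          | some ri =>
            simp only [Option.map_some]
            have h1 : i + 1 + li = i + (li + 1) := by omega
            have h2 : i + 1 + ri + 1 = i + (ri + 1) + 1 := by omega
            rw [h1, h2]
            simp [Nat.add_lt_add_iff_right]
  · rw [solutionGo, dif_neg h]
    unfold altOn
    rw [List.drop_eq_nil_of_le (by omega)]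
    rfl
termination_by l.length - i

-- ===== VERDICT (by name: the statement is the Claim_ definition above) =====
theorem solution_spec : Claim_equal_solution := by
  intro l _
  unfold Spec_solution solution solution_alt
  rw [go_eq_altOn]
  unfold altOn
  simp
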